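-- pv_equiv track=rewrite | github.com/DNYoussef/AIVillage | src/production/rag/wikipedia_data_loader.py | _categorize_topic
-- ===== SOURCE A (Python) =====
-- def _categorize_topic(topic: str) -> str:
--     """Categorize topic for metadata."""
--     topic_lower = topic.lower()
--
--     if any(
--         term in topic_lower
--         for term in [
--             "learning",
--             "intelligence",
--             "neural",
--             "algorithm",
--             "computer",
--             "python",
--         ]
--     ):
--         return "Computer Science"
--     if any(
--         term in topic_lower
--         for term in ["algebra", "calculus", "statistics", "probability", "graph"]
--     ):
--         return "Mathematics"
--     if any(
--         term in topic_lower
--         for term in ["physics", "chemistry", "biology", "quantum", "evolution"]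
--     ):
--         return "Science"
--     if any(
--         term in topic_lower
--         for term in ["war", "renaissance", "shakespeare", "rome", "revolution"]
--     ):
--         return "History & Literature"
--     return "General"
-- ===== SOURCE B (Python) =====
-- # Different algorithm: instead of testing each keyword against the topic with
-- # substring scans, enumerate all slices of the lowered topic once and look each
-- # up in a keyword->rank hash table, keeping the minimal (highest-priority) rank.
--
-- _KEYRANK = {
--     "learning": 0, "intelligence": 0, "neural": 0, "algorithm": 0,
--     "computer": 0, "python": 0,
--     "algebra": 1, "calculus": 1, "statistics": 1, "probability": 1, "graph": 1,
--     "physics": 2, "chemistry": 2, "biology": 2, "quantum": 2, "evolution": 2,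
--     "war": 3, "renaissance": 3, "shakespeare": 3, "rome": 3, "revolution": 3,
-- }
--
-- _NAMES = ["Computer Science", "Mathematics", "Science", "History & Literature", "General"]
--
-- _MAXLEN = max(map(len, _KEYRANK))
--
--
-- def _categorize_topic(topic: str) -> str:
--     topic_lower = topic.lower()
--     n = len(topic_lower)
--     subs = [topic_lower[i:j] for i in range(n + 1) for j in range(i, min(i + _MAXLEN, n) + 1)]
--     best = 4
--     for sub in subs:
--         r = _KEYRANK.get(sub)
--         if r is not None and r < best:
--             best = r
--     return _NAMES[best]
-- ===== Notes on version B (the rewrite author's own statement) =====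
-- stated objective: alternative
-- what changed: A tests each of 21 keywords against the topic with a substring scan per category branch; B instead enumerates all slices of the lowered topic once, looks each up in a keyword-to-rank hash table, keeps the minimal rank and maps it to the category name.
import Mathlib
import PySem

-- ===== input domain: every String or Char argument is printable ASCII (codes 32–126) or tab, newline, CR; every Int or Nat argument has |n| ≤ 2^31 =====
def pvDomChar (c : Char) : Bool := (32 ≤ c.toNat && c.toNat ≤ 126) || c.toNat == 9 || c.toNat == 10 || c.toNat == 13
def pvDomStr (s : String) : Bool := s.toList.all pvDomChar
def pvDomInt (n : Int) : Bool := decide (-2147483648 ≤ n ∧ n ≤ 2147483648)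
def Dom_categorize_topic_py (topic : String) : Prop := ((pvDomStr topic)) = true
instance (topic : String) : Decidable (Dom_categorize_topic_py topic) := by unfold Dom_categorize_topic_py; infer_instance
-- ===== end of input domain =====

-- B replaces A's per-keyword substring scans by one enumeration of all slices of
-- the lowered topic, looked up in a keyword->rank table keeping the minimal rank
-- (objective: alternative algorithm, not claimed faster).

-- ===== PORT A =====
def categorize_topic_py (topic : String) : String :=
  let topic_lower := PySem.Str.lower topic
  if ["learning", "intelligence", "neural", "algorithm", "computer", "python"].any
      (fun term => PySem.Str.isIn term topic_lower) then "Computer Science"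
  else if ["algebra", "calculus", "statistics", "probability", "graph"].any
      (fun term => PySem.Str.isIn term topic_lower) then "Mathematics"
  else if ["physics", "chemistry", "biology", "quantum", "evolution"].any
      (fun term => PySem.Str.isIn term topic_lower) then "Science"
  else if ["war", "renaissance", "shakespeare", "rome", "revolution"].any
      (fun term => PySem.Str.isIn term topic_lower) then "History & Literature"
  else "General"

-- ===== PORT B =====
def pvKeyRank : PySem.Dict String Int := PySem.Dict.ofList
  [("learning", 0), ("intelligence", 0), ("neural", 0), ("algorithm", 0),
   ("computer", 0), ("python", 0),
   ("algebra", 1), ("calculus", 1), ("statistics", 1), ("probability", 1), ("graph", 1),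
   ("physics", 2), ("chemistry", 2), ("biology", 2), ("quantum", 2), ("evolution", 2),
   ("war", 3), ("renaissance", 3), ("shakespeare", 3), ("rome", 3), ("revolution", 3)]

def pvNames : List String :=
  ["Computer Science", "Mathematics", "Science", "History & Literature", "General"]

-- _MAXLEN = max(map(len, _KEYRANK)); max over a non-empty literal list, default unreachable
def pvMaxLen : Int := (PySem.List.max? (pvKeyRank.keys.map PySem.Str.len) (fun x => x)).getD 0

-- the list comprehension [tl[i:j] for i in range(n+1) for j in range(i, min(i+_MAXLEN, n)+1)]
def pvSubsList (tl : String) : List String :=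
  (PySem.List.pyRange 0 (PySem.Str.len tl + 1) 1).flatMap (fun i =>
    (PySem.List.pyRange i (min (i + pvMaxLen) (PySem.Str.len tl) + 1) 1).map (fun j =>
      PySem.Str.slice tl (some i) (some j)))

def categorize_topic_py_alt (topic : String) : String :=
  let topic_lower := PySem.Str.lower topic
  let subs := pvSubsList topic_lower
  let best : Int := subs.foldl (fun best sub =>
    match pvKeyRank.get? sub with
    | some r => if r < best then r else best
    | none => best) 4
  -- NAMES[best]: best is always in [0,4], so Python never raises; default unreachable
  PySem.List.pyGetD pvNames best "General"

-- ===== PRECONDITION & SPEC =====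
def Spec_categorize_topic_py (topic : String) (out : String) : Prop := out = categorize_topic_py_alt topic
instance (topic : String) (out : String) : Decidable (Spec_categorize_topic_py topic out) := by unfold Spec_categorize_topic_py; infer_instance

-- ===== CLAIM (what is proved, stated in full; the proofs are below) =====
def Claim_equal_categorize_topic_py : Prop := ∀ (topic : String), Dom_categorize_topic_py topic → Spec_categorize_topic_py topic (categorize_topic_py topic)

-- ===== LEMMAS AND PROOFS =====

def pvRk (s : String) : Int := (pvKeyRank.get? s).getD 4

def pvKw0 : List String := ["learning", "intelligence", "neural", "algorithm", "computer", "python"]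
def pvKw1 : List String := ["algebra", "calculus", "statistics", "probability", "graph"]
def pvKw2 : List String := ["physics", "chemistry", "biology", "quantum", "evolution"]
def pvKw3 : List String := ["war", "renaissance", "shakespeare", "rome", "revolution"]

lemma pvRk_classify (s : String) :
    pvRk s = 4 ∨ (pvRk s = 0 ∧ s ∈ pvKw0) ∨ (pvRk s = 1 ∧ s ∈ pvKw1) ∨
      (pvRk s = 2 ∧ s ∈ pvKw2) ∨ (pvRk s = 3 ∧ s ∈ pvKw3) := by
  unfold pvRk
  cases h : pvKeyRank.get? s with
  | none => left; rfl
  | some r =>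
      have hm := PySem.Dict.mem_items_of_get?_eq_some pvKeyRank h
      have hit : pvKeyRank.items =
    [("learning", (0 : Int)),
     ("intelligence", (0 : Int)),
     ("neural", (0 : Int)),
     ("algorithm", (0 : Int)),
     ("computer", (0 : Int)),
     ("python", (0 : Int)),
     ("algebra", (1 : Int)),
     ("calculus", (1 : Int)),
     ("statistics", (1 : Int)),
     ("probability", (1 : Int)),
     ("graph", (1 : Int)),
     ("physics", (2 : Int)),
     ("chemistry", (2 : Int)),
     ("biology", (2 : Int)),
     ("quantum", (2 : Int)),
     ("evolution", (2 : Int)),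
     ("war", (3 : Int)),
     ("renaissance", (3 : Int)),
     ("shakespeare", (3 : Int)),
     ("rome", (3 : Int)),
     ("revolution", (3 : Int))] := rfl
      rw [hit] at hm
      simp only [List.mem_cons, List.not_mem_nil, or_false, Prod.mk.injEq] at hm
      rcases hm with ⟨rfl, rfl⟩|⟨rfl, rfl⟩|⟨rfl, rfl⟩|⟨rfl, rfl⟩|⟨rfl, rfl⟩|⟨rfl, rfl⟩|⟨rfl, rfl⟩|⟨rfl, rfl⟩|⟨rfl, rfl⟩|⟨rfl, rfl⟩|⟨rfl, rfl⟩|⟨rfl, rfl⟩|⟨rfl, rfl⟩|⟨rfl, rfl⟩|⟨rfl, rfl⟩|⟨rfl, rfl⟩|⟨rfl, rfl⟩|⟨rfl, rfl⟩|⟨rfl, rfl⟩|⟨rfl, rfl⟩|⟨rfl, rfl⟩ <;> decide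

lemma pvStep_eq (a : Int) (s : String) (ha : a ≤ 4) :
    (match pvKeyRank.get? s with
      | some r => if r < a then r else a
      | none => a) = min a (pvRk s) := by
  unfold pvRk
  cases h : pvKeyRank.get? s with
  | none => simp only [Option.getD_none, min_def]; split_ifs <;> omega
  | some r => simp only [Option.getD_some, min_def]; split_ifs <;> omega

lemma pvFold_eq (L : List String) : ∀ a : Int, a ≤ 4 →
    (L.foldl (fun best sub =>
      match pvKeyRank.get? sub with
      | some r => if r < best then r else best
      | none => best) a)
    = L.foldl (fun m s => min m (pvRk s)) a := by
  induction L with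
  | nil => intro a _; rfl
  | cons s t ih =>
      intro a ha
      simp only [List.foldl_cons, pvStep_eq a s ha]
      exact ih _ (le_trans (min_le_left _ _) ha)

lemma pvG_le_self (L : List String) : ∀ a : Int,
    L.foldl (fun m s => min m (pvRk s)) a ≤ a := by
  induction L with
  | nil => intro a; simp
  | cons x t ih =>
      intro a
      simp only [List.foldl_cons]
      exact le_trans (ih _) (min_le_left _ _)

lemma pvG_le_of_mem {L : List String} {s : String} (hs : s ∈ L) (a : Int) :
    L.foldl (fun m s => min m (pvRk s)) a ≤ pvRk s := by
  induction L generalizing a with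
  | nil => cases hs
  | cons x t ih =>
      simp only [List.foldl_cons]
      rcases List.mem_cons.mp hs with rfl | hs'
      · exact le_trans (pvG_le_self t _) (min_le_right _ _)
      · exact ih hs' _

lemma pvG_cases (L : List String) : ∀ a : Int,
    L.foldl (fun m s => min m (pvRk s)) a = a ∨
      ∃ s ∈ L, L.foldl (fun m s => min m (pvRk s)) a = pvRk s := by
  induction L with
  | nil => intro a; left; rfl
  | cons x t ih =>
      intro a
      simp only [List.foldl_cons]
      rcases ih (min a (pvRk x)) with h | ⟨s, hs, h⟩
      · rcases le_total a (pvRk x) with hle | hle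
        · left; rw [h]; omega
        · right; exact ⟨x, List.mem_cons_self .., by rw [h]; omega⟩
      · right; exact ⟨s, List.mem_cons_of_mem _ hs, h⟩

lemma pvSubs_mem (tl k : String) :
    k ∈ pvSubsList tl ↔ k.toList <:+: tl.toList ∧ k.toList.length ≤ 12 := by
  unfold pvSubsList
  rw [show pvMaxLen = 12 from rfl]
  simp only [List.mem_flatMap, List.mem_map, PySem.List.mem_pyRange_one, PySem.Str.len_eq]
  constructor
  · rintro ⟨i, ⟨hi0, _⟩, j, ⟨hij, hjlt⟩, rfl⟩
    have h1 : (PySem.Str.slice tl (some i) (some j)).toList =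
        ((tl.toList.drop i.toNat).take (j.toNat - i.toNat)) := by
      simp [PySem.List.slice_toNat _ hi0 (le_trans hi0 hij)]
    rw [h1]
    refine ⟨(List.take_prefix _ _).isInfix.trans (List.drop_suffix _ _).isInfix, ?_⟩
    have := List.length_take_le (j.toNat - i.toNat) (tl.toList.drop i.toNat)
    omega
  · rintro ⟨hinf, hk12⟩
    obtain ⟨p, t, hpt⟩ := hinf
    have hlen : tl.toList.length = p.length + k.toList.length + t.length := by
      rw [← hpt]; simp only [List.length_append]
    refine ⟨(p.length : Int), ⟨Int.natCast_nonneg _, by push_cast; omega⟩,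
      ((p.length + k.toList.length : Nat) : Int), ⟨by push_cast; omega, ?_⟩, ?_⟩
    · push_cast; omega
    apply String.toList_inj.mp
    have h2 : PySem.List.slice tl.toList (some (p.length : Int))
        (some ((p.length + k.toList.length : Nat) : Int)) =
        (tl.toList.drop p.length).take k.toList.length := by
      rw [PySem.List.slice_toNat _ (Int.natCast_nonneg _) (Int.natCast_nonneg _)]
      simp
      omega
    calc (PySem.Str.slice tl (some (p.length : Int))
            (some ((p.length + k.toList.length : Nat) : Int))).toList
        = PySem.List.slice tl.toList (some (p.length : Int))
            (some ((p.length + k.toList.length : Nat) : Int)) := by simp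
      _ = (tl.toList.drop p.length).take k.toList.length := h2
      _ = k.toList := by
            rw [← hpt, List.append_assoc, List.drop_left, List.take_left]

lemma pvKey_mem_subs (tl k : String) (hk : k.toList.length ≤ 12) :
    k ∈ pvSubsList tl ↔ PySem.Str.isIn k tl = true := by
  rw [pvSubs_mem, PySem.Str.isIn_iff_infix]
  exact ⟨fun h => h.1, fun h => ⟨h, hk⟩⟩

lemma pvBest_eq (tl : String) :
    (pvSubsList tl).foldl (fun m s => min m (pvRk s)) 4 =
      (if pvKw0.any (fun t => PySem.Str.isIn t tl) then 0
       else if pvKw1.any (fun t => PySem.Str.isIn t tl) then 1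
       else if pvKw2.any (fun t => PySem.Str.isIn t tl) then 2
       else if pvKw3.any (fun t => PySem.Str.isIn t tl) then 3
       else 4) := by
  set L := pvSubsList tl with hL
  set v := L.foldl (fun m s => min m (pvRk s)) 4 with hv
  have hcases := pvG_cases L 4
  rw [← hv] at hcases
  have hrange : v = 0 ∨ v = 1 ∨ v = 2 ∨ v = 3 ∨ v = 4 := by
    rcases hcases with h4 | ⟨s, _, hrk⟩
    · omega
    · rcases pvRk_classify s with h | ⟨h, _⟩ | ⟨h, _⟩ | ⟨h, _⟩ | ⟨h, _⟩ <;> omega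
  have hub : ∀ (kw : List String) (i : Int), (∀ x ∈ kw, pvRk x = i) →
      (∀ x ∈ kw, x.toList.length ≤ 12) →
      kw.any (fun t => PySem.Str.isIn t tl) = true → v ≤ i := by
    intro kw i hrk h12 hany
    rcases List.any_eq_true.mp hany with ⟨x, hx, hin⟩
    have hmem : x ∈ L := (pvKey_mem_subs tl x (h12 x hx)).mpr hin
    have := pvG_le_of_mem hmem 4
    rw [← hv, hrk x hx] at this
    exact this
  have hdn : ∀ (kw : List String) (i : Int), (∀ s, pvRk s = i → s ∈ kw) → i ≤ 3 →
      v = i → kw.any (fun t => PySem.Str.isIn t tl) = true := by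
    intro kw i hcl hi3 hvi
    rcases hcases with h4 | ⟨s, hs, hrk⟩
    · exfalso; omega
    · exact List.any_eq_true.mpr ⟨s, hcl s (by omega),
        (PySem.Str.isIn_iff_infix s tl).mpr ((pvSubs_mem tl s).mp hs).1⟩
  have hk0 : ∀ x ∈ pvKw0, pvRk x = 0 := by decide
  have hk1 : ∀ x ∈ pvKw1, pvRk x = 1 := by decide
  have hk2 : ∀ x ∈ pvKw2, pvRk x = 2 := by decide
  have hk3 : ∀ x ∈ pvKw3, pvRk x = 3 := by decide
  have hc0 : ∀ s, pvRk s = 0 → s ∈ pvKw0 := by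
    intro s h
    rcases pvRk_classify s with h' | ⟨h', hm⟩ | ⟨h', hm⟩ | ⟨h', hm⟩ | ⟨h', hm⟩ <;>
      first | omega | exact hm
  have hc1 : ∀ s, pvRk s = 1 → s ∈ pvKw1 := by
    intro s h
    rcases pvRk_classify s with h' | ⟨h', hm⟩ | ⟨h', hm⟩ | ⟨h', hm⟩ | ⟨h', hm⟩ <;>
      first | omega | exact hm
  have hc2 : ∀ s, pvRk s = 2 → s ∈ pvKw2 := by
    intro s h
    rcases pvRk_classify s with h' | ⟨h', hm⟩ | ⟨h', hm⟩ | ⟨h', hm⟩ | ⟨h', hm⟩ <;>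
      first | omega | exact hm
  have hc3 : ∀ s, pvRk s = 3 → s ∈ pvKw3 := by
    intro s h
    rcases pvRk_classify s with h' | ⟨h', hm⟩ | ⟨h', hm⟩ | ⟨h', hm⟩ | ⟨h', hm⟩ <;>
      first | omega | exact hm
  split_ifs with b0 b1 b2 b3
  · have h := hub pvKw0 0 hk0 (by decide) b0
    rcases hrange with h' | h' | h' | h' | h' <;> omega
  · have hne0 : v ≠ 0 := fun h => b0 (hdn pvKw0 0 hc0 (by omega) h)
    have h := hub pvKw1 1 hk1 (by decide) b1
    rcases hrange with h' | h' | h' | h' | h' <;> omega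
  · have hne0 : v ≠ 0 := fun h => b0 (hdn pvKw0 0 hc0 (by omega) h)
    have hne1 : v ≠ 1 := fun h => b1 (hdn pvKw1 1 hc1 (by omega) h)
    have h := hub pvKw2 2 hk2 (by decide) b2
    rcases hrange with h' | h' | h' | h' | h' <;> omega
  · have hne0 : v ≠ 0 := fun h => b0 (hdn pvKw0 0 hc0 (by omega) h)
    have hne1 : v ≠ 1 := fun h => b1 (hdn pvKw1 1 hc1 (by omega) h)
    have hne2 : v ≠ 2 := fun h => b2 (hdn pvKw2 2 hc2 (by omega) h)
    have h := hub pvKw3 3 hk3 (by decide) b3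
    rcases hrange with h' | h' | h' | h' | h' <;> omega
  · have hne0 : v ≠ 0 := fun h => b0 (hdn pvKw0 0 hc0 (by omega) h)
    have hne1 : v ≠ 1 := fun h => b1 (hdn pvKw1 1 hc1 (by omega) h)
    have hne2 : v ≠ 2 := fun h => b2 (hdn pvKw2 2 hc2 (by omega) h)
    have hne3 : v ≠ 3 := fun h => b3 (hdn pvKw3 3 hc3 (by omega) h)
    rcases hrange with h' | h' | h' | h' | h' <;> omega

-- ===== VERDICT (by name: the statement is the Claim_ definition above) =====
theorem categorize_topic_py_spec : Claim_equal_categorize_topic_py := by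
  intro topic _
  show categorize_topic_py topic = categorize_topic_py_alt topic
  have hA : categorize_topic_py topic =
      (if pvKw0.any (fun t => PySem.Str.isIn t (PySem.Str.lower topic)) then "Computer Science"
       else if pvKw1.any (fun t => PySem.Str.isIn t (PySem.Str.lower topic)) then "Mathematics"
       else if pvKw2.any (fun t => PySem.Str.isIn t (PySem.Str.lower topic)) then "Science"
       else if pvKw3.any (fun t => PySem.Str.isIn t (PySem.Str.lower topic)) then "History & Literature"
       else "General") := rfl
  have hB : categorize_topic_py_alt topic =
      PySem.List.pyGetD pvNames
        ((pvSubsList (PySem.Str.lower topic)).foldl (fun best sub =>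
          match pvKeyRank.get? sub with
          | some r => if r < best then r else best
          | none => best) 4) "General" := rfl
  rw [hA, hB, pvFold_eq _ 4 le_rfl, pvBest_eq]
  split_ifs <;> rfl
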